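-- pv_equiv track=rewrite | github.com/davidjmcclure/proceduralTwitterWorlds | twitterWorlds/twitterMiner/sentimentAnalyser.py | sentimentComparison
-- ===== SOURCE A (Python) =====
-- def tweetAnalysis(tweet, sentimentDict):
--
-- 	sentiment = 0
--
-- 	tweet = tweet.split()
--
-- 	for word in tweet:
--
-- 		try:
--
-- 			sentiment = sentiment + int(sentimentDict[word])
--
-- 		except KeyError:
--
-- 			pass
--
-- 	return sentiment
--
-- def sentimentComparison(tweetDict, keyword1, keyword2, sentimentDict):
--
-- 	relationship = 0
--
-- 	for tweet in tweetDict: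
--
-- 		check1 = 0
-- 		check2 = 0
--
-- 		actualTweet = tweetDict[tweet]
--
-- 		actualTweet = actualTweet.split()
--
-- 		for word in actualTweet:
--
-- 			if word == keyword1:
--
-- 				check1 = check1 + 1
--
-- 			if word == keyword2:
--
-- 				check2 = check2 + 1
--
-- 		if check1 > 0 and check2 > 0:
--
-- 			relationship = relationship + tweetAnalysis(tweetDict[tweet], sentimentDict)
--
-- 	return relationship
-- ===== SOURCE B (Python) =====
-- def sentimentComparison(tweetDict, keyword1, keyword2, sentimentDict):
--     relationship = 0
--     for tweet in tweetDict.values():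
--         counts = {}
--         for w in tweet.split():
--             counts[w] = counts.get(w, 0) + 1
--         if counts.get(keyword1, 0) and counts.get(keyword2, 0):
--             for w, c in counts.items():
--                 try:
--                     relationship += c * int(sentimentDict[w])
--                 except KeyError:
--                     pass
--     return relationship
-- ===== Notes on version B (the rewrite author's own statement) =====
-- stated objective: alternative
-- what changed: B builds a per-tweet word-count dictionary in one pass, decides the two-keyword condition from the stored counts, and sums count*int(sentimentDict[w]) over the DISTINCT words of the tweet, replacing A's two counting scans and tweetAnalysis's per-occurrence sum.
import Mathlib
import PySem

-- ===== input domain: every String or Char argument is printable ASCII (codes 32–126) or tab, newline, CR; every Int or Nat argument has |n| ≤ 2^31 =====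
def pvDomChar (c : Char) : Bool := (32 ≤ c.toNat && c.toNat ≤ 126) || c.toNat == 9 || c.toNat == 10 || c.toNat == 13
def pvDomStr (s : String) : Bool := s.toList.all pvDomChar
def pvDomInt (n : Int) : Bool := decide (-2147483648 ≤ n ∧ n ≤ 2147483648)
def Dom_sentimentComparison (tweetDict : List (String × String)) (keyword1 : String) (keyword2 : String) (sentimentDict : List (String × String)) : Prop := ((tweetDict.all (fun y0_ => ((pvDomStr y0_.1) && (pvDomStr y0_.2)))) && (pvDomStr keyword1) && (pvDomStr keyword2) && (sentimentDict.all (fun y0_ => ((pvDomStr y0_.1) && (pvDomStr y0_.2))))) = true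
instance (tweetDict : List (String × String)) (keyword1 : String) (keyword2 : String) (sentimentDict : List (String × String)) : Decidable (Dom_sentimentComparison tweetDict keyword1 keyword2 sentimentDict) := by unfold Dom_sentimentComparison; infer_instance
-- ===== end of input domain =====

-- B replaces A's per-occurrence scans by a per-tweet word-count dictionary: keywords are checked
-- via their counts and the sentiment is summed as count * value over the DISTINCT words
-- (objective: alternative; same asymptotic cost, one aggregation pass per tweet).


-- ===== PORT A =====
def tweetAnalysis (tweet : String) (sd : PySem.Dict String String) : Int :=
  -- sentiment = 0; for word in tweet.split(): try sentiment += int(sd[word]) except KeyError: pass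
  -- (int() total under Pre_: every looked-up value parses there)
  (PySem.Str.split₀ tweet).foldl
    (fun sentiment word =>
      match sd.get? word with
      | some v => sentiment + (PySem.Int.ofStr? v).getD 0
      | none => sentiment) 0

def sentimentComparison (tweetDict : List (String × String)) (keyword1 : String) (keyword2 : String) (sentimentDict : List (String × String)) : Int :=
  let td := PySem.Dict.ofList tweetDict
  let sd := PySem.Dict.ofList sentimentDict
  td.keys.foldl
    (fun relationship tweet =>
      let actualTweet := PySem.Str.split₀ (td.getD tweet "")
      let check1 := actualTweet.foldl (fun c w => if w = keyword1 then c + 1 else c) (0 : Int)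
      let check2 := actualTweet.foldl (fun c w => if w = keyword2 then c + 1 else c) (0 : Int)
      if check1 > 0 ∧ check2 > 0 then relationship + tweetAnalysis (td.getD tweet "") sd
      else relationship) 0

-- ===== PORT B =====
def sentimentComparison_alt (tweetDict : List (String × String)) (keyword1 : String) (keyword2 : String) (sentimentDict : List (String × String)) : Int :=
  let sd := PySem.Dict.ofList sentimentDict
  (PySem.Dict.ofList tweetDict).values.foldl
    (fun relationship tweet =>
      -- counts = {}; for w in tweet.split(): counts[w] = counts.get(w, 0) + 1
      let counts : PySem.Dict String Int :=
        (PySem.Str.split₀ tweet).foldl (fun d w => d.insert w (d.getD w 0 + 1)) PySem.Dict.empty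
      if counts.getD keyword1 0 ≠ 0 ∧ counts.getD keyword2 0 ≠ 0 then
        -- for w, c in counts.items(): try relationship += c * int(sentimentDict[w]) except KeyError: pass
        counts.items.foldl
          (fun r p =>
            match sd.get? p.1 with
            | some v => r + p.2 * (PySem.Int.ofStr? v).getD 0
            | none => r) relationship
      else relationship) 0

-- ===== PRECONDITION & SPEC =====
-- Pre_ excludes exactly the inputs on which Python A raises ValueError: some tweet containing
-- both keywords has a word whose sentimentDict value does not parse as an int.
def Pre_sentimentComparison (tweetDict : List (String × String)) (keyword1 : String) (keyword2 : String) (sentimentDict : List (String × String)) : Prop :=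
  ∀ t ∈ (PySem.Dict.ofList tweetDict).values,
    (keyword1 ∈ PySem.Str.split₀ t ∧ keyword2 ∈ PySem.Str.split₀ t) →
      ∀ w ∈ PySem.Str.split₀ t, ∀ v,
        (PySem.Dict.ofList sentimentDict).get? w = some v → (PySem.Int.ofStr? v).isSome
instance (tweetDict : List (String × String)) (keyword1 : String) (keyword2 : String) (sentimentDict : List (String × String)) : Decidable (Pre_sentimentComparison tweetDict keyword1 keyword2 sentimentDict) := by unfold Pre_sentimentComparison; infer_instance

def pvWitness_sentimentComparison : (List (String × String)) × String × String × (List (String × String)) :=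
  ([("a", "good day")], "good", "day", [("good", "2")])

def Spec_sentimentComparison (tweetDict : List (String × String)) (keyword1 : String) (keyword2 : String) (sentimentDict : List (String × String)) (out : Int) : Prop := out = sentimentComparison_alt tweetDict keyword1 keyword2 sentimentDict
instance (tweetDict : List (String × String)) (keyword1 : String) (keyword2 : String) (sentimentDict : List (String × String)) (out : Int) : Decidable (Spec_sentimentComparison tweetDict keyword1 keyword2 sentimentDict out) := by unfold Spec_sentimentComparison; infer_instance

-- ===== CLAIM (what is proved, stated in full; the proofs are below) =====
def Claim_equal_sentimentComparison : Prop := ∀ (tweetDict : List (String × String)) (keyword1 : String) (keyword2 : String) (sentimentDict : List (String × String)), Dom_sentimentComparison tweetDict keyword1 keyword2 sentimentDict → Pre_sentimentComparison tweetDict keyword1 keyword2 sentimentDict → Spec_sentimentComparison tweetDict keyword1 keyword2 sentimentDict (sentimentComparison tweetDict keyword1 keyword2 sentimentDict)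

-- ===== LEMMAS AND PROOFS =====

-- A's counting scan is positive iff the keyword occurs in the word list.
theorem countFold_pos_iff (k : String) (ws : List String) (c : Int) (hc : 0 ≤ c) :
    (0 < ws.foldl (fun c w => if w = k then c + 1 else c) c) ↔ (0 < c ∨ k ∈ ws) := by
  induction ws generalizing c with
  | nil => simp
  | cons w ws ih =>
    by_cases hw : w = k
    · subst hw
      simp only [List.foldl_cons, if_true]
      rw [ih (c + 1) (by omega)]
      simp [List.mem_cons]
      omega
    · simp only [List.foldl_cons, if_neg hw, ih c hc, List.mem_cons]
      constructor
      · rintro (h | h) <;> tauto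
      · rintro (h | h | h) <;> tauto

-- The weighted-by-multiplicity sum over the distinct elements equals the plain sum.
theorem sum_toFinset_count_mul (ws : List String) (g : String → Int) :
    (∑ x ∈ ws.toFinset, (ws.count x : Int) * g x) = (ws.map g).sum := by
  induction ws with
  | nil => simp
  | cons w t ih =>
    simp only [List.toFinset_cons, List.map_cons, List.sum_cons]
    by_cases hw : w ∈ t
    · rw [Finset.insert_eq_self.mpr (List.mem_toFinset.mpr hw), ← ih]
      rw [show (∑ x ∈ t.toFinset, ((w :: t).count x : Int) * g x)
            = (∑ x ∈ t.toFinset, ((t.count x : Int) * g x + if x = w then g w else 0)) from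
          Finset.sum_congr rfl (by
            intro x _
            by_cases hx : x = w
            · subst hx; simp [List.count_cons_self]; ring
            · have hbne : (w == x) = false := by
                simp only [beq_eq_false_iff_ne, ne_eq]
                exact fun h => hx (Eq.symm h)
              simp only [List.count_cons, hbne, if_neg hx]
              push_cast; ring)]
      rw [Finset.sum_add_distrib, Finset.sum_ite_eq' t.toFinset w (fun _ => g w)]
      simp [List.mem_toFinset.mpr hw]
      ring
    · rw [Finset.sum_insert (by simpa using hw)]
      rw [show (∑ x ∈ t.toFinset, ((w :: t).count x : Int) * g x)
            = (∑ x ∈ t.toFinset, (t.count x : Int) * g x) from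
          Finset.sum_congr rfl (by
            intro x hx
            have : x ≠ w := fun h => hw (h ▸ List.mem_toFinset.mp hx)
            simp [List.count_cons]
            exact Or.inl fun h => this (Eq.symm h))]
      rw [ih, List.count_cons_self, List.count_eq_zero_of_not_mem hw]
      push_cast; ring

-- Sum over PySem's first-insertion distinct list equals the Finset sum over the same elements.
theorem sum_map_ofList_eq_finset (ws : List String) (f : String → Int) :
    ((PySem.Set.ofList ws).map f).sum = ∑ x ∈ ws.toFinset, f x := by
  rw [List.sum_toFinset f (PySem.Set.nodup_ofList ws) |>.symm]
  · apply Finset.sum_congr _ (fun _ _ => rfl)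
    ext x
    simp [PySem.Set.mem_ofList]

-- Per-tweet bodies of the two folds agree.
theorem body_eq (keyword1 keyword2 : String) (sd : PySem.Dict String String)
    (relationship : Int) (t : String) :
    (if (PySem.Str.split₀ t).foldl (fun c w => if w = keyword1 then c + 1 else c) (0 : Int) > 0 ∧
        (PySem.Str.split₀ t).foldl (fun c w => if w = keyword2 then c + 1 else c) (0 : Int) > 0 then
       relationship + tweetAnalysis t sd
     else relationship)
    = (let counts : PySem.Dict String Int :=
         (PySem.Str.split₀ t).foldl (fun d w => d.insert w (d.getD w 0 + 1)) PySem.Dict.empty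
       if counts.getD keyword1 0 ≠ 0 ∧ counts.getD keyword2 0 ≠ 0 then
         counts.items.foldl
           (fun r p =>
             match sd.get? p.1 with
             | some v => r + p.2 * (PySem.Int.ofStr? v).getD 0
             | none => r) relationship
       else relationship) := by
  set ws := PySem.Str.split₀ t with hws
  have hcnt : ws.foldl (fun d w => d.insert w (d.getD w 0 + 1)) PySem.Dict.empty
      = PySem.Dict.counter ws := PySem.Dict.foldl_insert_getD_add_one_eq_counter ws
  simp only [hcnt]
  -- conditions agree
  have hcond : ∀ k : String,
      (0 < ws.foldl (fun c w => if w = k then c + 1 else c) (0 : Int))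
        ↔ ((PySem.Dict.counter ws).getD k 0 ≠ 0) := by
    intro k
    rw [countFold_pos_iff k ws 0 le_rfl, PySem.Dict.getD_counter]
    simp
    constructor
    · intro h; have := List.count_pos_iff.mpr h; omega
    · intro h
      by_contra hm
      simp [List.count_eq_zero_of_not_mem hm] at h
  -- sums agree
  have gA : String → Int := fun w =>
    match sd.get? w with
    | some v => (PySem.Int.ofStr? v).getD 0
    | none => 0
  have hsum :
      (PySem.Dict.counter ws).items.foldl
        (fun r p =>
          match sd.get? p.1 with
          | some v => r + p.2 * (PySem.Int.ofStr? v).getD 0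
          | none => r) relationship
      = relationship + tweetAnalysis t sd := by
    have hbody :
        (fun (r : Int) (p : String × Int) =>
          match sd.get? p.1 with
          | some v => r + p.2 * (PySem.Int.ofStr? v).getD 0
          | none => r)
        = (fun (r : Int) (p : String × Int) => r +
            p.2 * (match sd.get? p.1 with
                   | some v => (PySem.Int.ofStr? v).getD 0
                   | none => 0)) := by
      funext r p
      cases sd.get? p.1 <;> simp
    rw [hbody, PySem.List.foldl_add]
    have hA :
        (fun (r : Int) (w : String) =>
          match sd.get? w with
          | some v => r + (PySem.Int.ofStr? v).getD 0
          | none => r)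
        = (fun (r : Int) (w : String) => r +
            (match sd.get? w with
             | some v => (PySem.Int.ofStr? v).getD 0
             | none => 0)) := by
      funext r w
      cases sd.get? w <;> simp
    have htA : tweetAnalysis t sd
        = (ws.map (fun w =>
            match sd.get? w with
            | some v => (PySem.Int.ofStr? v).getD 0
            | none => 0)).sum := by
      unfold tweetAnalysis
      rw [← hws, hA, PySem.List.foldl_add]
      simp
    rw [htA]
    congr 1
    rw [PySem.Dict.items_counter, List.map_map]
    have : ((fun (p : String × Int) =>
              p.2 * (match sd.get? p.1 with
                     | some v => (PySem.Int.ofStr? v).getD 0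
                     | none => 0)) ∘ fun k => (k, (ws.count k : Int)))
        = fun k => (ws.count k : Int) *
            (match sd.get? k with
             | some v => (PySem.Int.ofStr? v).getD 0
             | none => 0) := rfl
    rw [this, sum_map_ofList_eq_finset, sum_toFinset_count_mul]
  rw [if_congr (and_congr (hcond keyword1) (hcond keyword2)) hsum.symm rfl]

-- ===== VERDICT (by name: the statement is the Claim_ definition above) =====
theorem sentimentComparison_spec : Claim_equal_sentimentComparison := by
  intro tweetDict keyword1 keyword2 sentimentDict _hDom _hPre
  unfold Spec_sentimentComparison sentimentComparison sentimentComparison_alt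
  simp only []
  rw [PySem.Dict.values_eq_map_keys (PySem.Dict.ofList tweetDict)
        (PySem.Dict.nodup_keys_ofList tweetDict) "", List.foldl_map]
  congr 1
  funext rel t
  exact body_eq keyword1 keyword2 (PySem.Dict.ofList sentimentDict) rel
    ((PySem.Dict.ofList tweetDict).getD t "")
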